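-- pv_equiv track=rewrite | github.com/SachuCodes/learnzo_new | app/services/content_engine.py | generate_content
-- ===== SOURCE A (Python) =====
-- STATIC_CONTENT = {
--     ("Photosynthesis", "visual", "easy"): {
--         "type": "visual",
--         "description": "Simple diagram showing how plants use sunlight, water, and CO2 to make food."
--     },
--
--     ("Photosynthesis", "auditory", "easy"): {
--         "type": "audio",
--         "script": "Photosynthesis is how plants make their own food using sunlight, water, and air."
--     },
--
--     ("Photosynthesis", "text", "easy"): {
--         "type": "text",
--         "content": "Photosynthesis is the process by which plants prepare food using sunlight."
--     },
--
--     ("Photosynthesis", "visual", "medium"): {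
--         "type": "visual",
--         "description": "Labeled diagram showing light reactions and Calvin cycle."
--     },
--
--     ("Photosynthesis", "auditory", "medium"): {
--         "type": "audio",
--         "script": "Photosynthesis occurs in chloroplasts and involves light-dependent and light-independent reactions."
--     },
--
--     ("Photosynthesis", "text", "medium"): {
--         "type": "text",
--         "content": "Photosynthesis consists of light-dependent reactions and the Calvin cycle."
--     }
-- }
--
-- def generate_content(modality: str, topic: str, difficulty: str = "easy"):
--     """
--     Static content retrieval.
--     Priority: exact match → fallback by modality → generic fallback
--     """
--
--     # Exact match
--     key = (topic, modality, difficulty)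
--     if key in STATIC_CONTENT:
--         return STATIC_CONTENT[key]
--
--     # Fallback: any content with same topic + modality
--     for (t, m, d), content in STATIC_CONTENT.items():
--         if t == topic and m == modality:
--             return content
--
--     # Final fallback
--     return {
--         "type": "text",
--         "content": f"Basic explanation of {topic}."
--     }
-- ===== SOURCE B (Python) =====
-- STATIC_CONTENT = {
--     ("Photosynthesis", "visual", "easy"): {
--         "type": "visual",
--         "description": "Simple diagram showing how plants use sunlight, water, and CO2 to make food."
--     },
--     ("Photosynthesis", "auditory", "easy"): {
--         "type": "audio",
--         "script": "Photosynthesis is how plants make their own food using sunlight, water, and air."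
--     },
--     ("Photosynthesis", "text", "easy"): {
--         "type": "text",
--         "content": "Photosynthesis is the process by which plants prepare food using sunlight."
--     },
--     ("Photosynthesis", "visual", "medium"): {
--         "type": "visual",
--         "description": "Labeled diagram showing light reactions and Calvin cycle."
--     },
--     ("Photosynthesis", "auditory", "medium"): {
--         "type": "audio",
--         "script": "Photosynthesis occurs in chloroplasts and involves light-dependent and light-independent reactions."
--     },
--     ("Photosynthesis", "text", "medium"): {
--         "type": "text",
--         "content": "Photosynthesis consists of light-dependent reactions and the Calvin cycle."
--     }
-- }
--
-- # Module-level index built once: (topic, modality) -> ordered {difficulty: content}.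
-- INDEX = {}
-- for (_t, _m, _d), _content in STATIC_CONTENT.items():
--     INDEX.setdefault((_t, _m), {})[_d] = _content
--
--
-- def generate_content(modality: str, topic: str, difficulty: str = "easy"):
--     group = INDEX.get((topic, modality))
--     if group is None:
--         return {"type": "text", "content": f"Basic explanation of {topic}."}
--     if difficulty in group:
--         return group[difficulty]
--     return next(iter(group.values()))
-- ===== Notes on version B (the rewrite author's own statement) =====
-- stated objective: alternative
-- what changed: B precomputes a module-level index mapping (topic, modality) to the insertion-ordered {difficulty: content} dict and answers each call by two direct lookups (exact difficulty, else first entry of the group), replacing A's per-call membership test on the triple-keyed dict plus linear scan over all items.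
import Mathlib
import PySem

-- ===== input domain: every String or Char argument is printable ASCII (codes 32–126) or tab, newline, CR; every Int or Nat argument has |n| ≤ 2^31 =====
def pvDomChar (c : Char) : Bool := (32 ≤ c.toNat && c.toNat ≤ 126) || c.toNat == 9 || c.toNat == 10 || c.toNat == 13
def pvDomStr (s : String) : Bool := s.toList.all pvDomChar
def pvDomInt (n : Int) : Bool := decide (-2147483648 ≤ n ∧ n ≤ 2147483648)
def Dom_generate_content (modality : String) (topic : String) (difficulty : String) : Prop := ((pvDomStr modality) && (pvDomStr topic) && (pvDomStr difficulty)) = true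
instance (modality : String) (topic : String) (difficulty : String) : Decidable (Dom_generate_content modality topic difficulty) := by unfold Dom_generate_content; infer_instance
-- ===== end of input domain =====

-- B replaces A's runtime membership test plus linear scan by a module-level index from
-- (topic, modality) to the ordered difficulty→content dict, looked up directly (objective: alternative).

-- ===== PORT A =====
-- STATIC_CONTENT: dict keyed by (topic, modality, difficulty); values are dicts → assoc lists.
def STATIC_CONTENT : PySem.Dict (String × String × String) (List (String × String)) :=
  PySem.Dict.ofList
    [ (("Photosynthesis", "visual", "easy"),
        [("type", "visual"), ("description", "Simple diagram showing how plants use sunlight, water, and CO2 to make food.")]),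
      (("Photosynthesis", "auditory", "easy"),
        [("type", "audio"), ("script", "Photosynthesis is how plants make their own food using sunlight, water, and air.")]),
      (("Photosynthesis", "text", "easy"),
        [("type", "text"), ("content", "Photosynthesis is the process by which plants prepare food using sunlight.")]),
      (("Photosynthesis", "visual", "medium"),
        [("type", "visual"), ("description", "Labeled diagram showing light reactions and Calvin cycle.")]),
      (("Photosynthesis", "auditory", "medium"),
        [("type", "audio"), ("script", "Photosynthesis occurs in chloroplasts and involves light-dependent and light-independent reactions.")]),
      (("Photosynthesis", "text", "medium"),
        [("type", "text"), ("content", "Photosynthesis consists of light-dependent reactions and the Calvin cycle.")]) ]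

-- A's fallback loop: first item whose key matches topic and modality (insertion order).
def scanA (items : List ((String × String × String) × List (String × String)))
    (topic modality : String) : Option (List (String × String)) :=
  match items with
  | [] => none
  | ((t, m, _d), content) :: rest =>
    if t == topic && m == modality then some content else scanA rest topic modality

def generate_content (modality : String) (topic : String) (difficulty : String) : List (String × String) :=
  let key := (topic, modality, difficulty)
  if STATIC_CONTENT.contains key then
    (STATIC_CONTENT.get? key).getD []          -- `STATIC_CONTENT[key]`; contains guarantees `some`
  else
    match scanA STATIC_CONTENT.items topic modality with
    | some content => content
    | none => [("type", "text"), ("content", "Basic explanation of " ++ topic ++ ".")]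

-- ===== PORT B =====
-- Module-level index: (topic, modality) → ordered {difficulty: content}; setdefault-then-assign = Dict.modify.
def INDEX : PySem.Dict (String × String) (PySem.Dict String (List (String × String))) :=
  STATIC_CONTENT.items.foldl
    (fun idx kv =>
      idx.modify (kv.1.1, kv.1.2.1) PySem.Dict.empty (fun g => g.insert kv.1.2.2 kv.2))
    PySem.Dict.empty

def generate_content_alt (modality : String) (topic : String) (difficulty : String) : List (String × String) :=
  match INDEX.get? (topic, modality) with
  | none => [("type", "text"), ("content", "Basic explanation of " ++ topic ++ ".")]
  | some group =>
    if group.contains difficulty then (group.get? difficulty).getD []   -- `group[difficulty]`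
    else (group.values.head?).getD []          -- next(iter(group.values())); every group is nonempty

-- ===== PRECONDITION & SPEC =====
def Spec_generate_content (modality : String) (topic : String) (difficulty : String) (out : List (String × String)) : Prop := out = generate_content_alt modality topic difficulty
instance (modality : String) (topic : String) (difficulty : String) (out : List (String × String)) : Decidable (Spec_generate_content modality topic difficulty out) := by unfold Spec_generate_content; infer_instance

-- ===== CLAIM (what is proved, stated in full; the proofs are below) =====
def Claim_equal_generate_content : Prop := ∀ (modality : String) (topic : String) (difficulty : String), Dom_generate_content modality topic difficulty → Spec_generate_content modality topic difficulty (generate_content modality topic difficulty)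

-- ===== LEMMAS AND PROOFS =====
-- Normal forms of the two module-level tables, so simp can scan them.
theorem SC_eq : STATIC_CONTENT = PySem.Dict.mk
    [ (("Photosynthesis", "visual", "easy"),
        [("type", "visual"), ("description", "Simple diagram showing how plants use sunlight, water, and CO2 to make food.")]),
      (("Photosynthesis", "auditory", "easy"),
        [("type", "audio"), ("script", "Photosynthesis is how plants make their own food using sunlight, water, and air.")]),
      (("Photosynthesis", "text", "easy"),
        [("type", "text"), ("content", "Photosynthesis is the process by which plants prepare food using sunlight.")]),
      (("Photosynthesis", "visual", "medium"),
        [("type", "visual"), ("description", "Labeled diagram showing light reactions and Calvin cycle.")]),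
      (("Photosynthesis", "auditory", "medium"),
        [("type", "audio"), ("script", "Photosynthesis occurs in chloroplasts and involves light-dependent and light-independent reactions.")]),
      (("Photosynthesis", "text", "medium"),
        [("type", "text"), ("content", "Photosynthesis consists of light-dependent reactions and the Calvin cycle.")]) ] := by
  decide

theorem INDEX_eq : INDEX = PySem.Dict.mk
    [ (("Photosynthesis", "visual"), PySem.Dict.mk
        [ ("easy", [("type", "visual"), ("description", "Simple diagram showing how plants use sunlight, water, and CO2 to make food.")]),
          ("medium", [("type", "visual"), ("description", "Labeled diagram showing light reactions and Calvin cycle.")]) ]),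
      (("Photosynthesis", "auditory"), PySem.Dict.mk
        [ ("easy", [("type", "audio"), ("script", "Photosynthesis is how plants make their own food using sunlight, water, and air.")]),
          ("medium", [("type", "audio"), ("script", "Photosynthesis occurs in chloroplasts and involves light-dependent and light-independent reactions.")]) ]),
      (("Photosynthesis", "text"), PySem.Dict.mk
        [ ("easy", [("type", "text"), ("content", "Photosynthesis is the process by which plants prepare food using sunlight.")]),
          ("medium", [("type", "text"), ("content", "Photosynthesis consists of light-dependent reactions and the Calvin cycle.")]) ]) ] := by
  decide

-- ===== VERDICT (by name: the statement is the Claim_ definition above) =====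
theorem generate_content_spec : Claim_equal_generate_content := by
  intro modality topic difficulty _
  unfold Spec_generate_content
  by_cases ht : topic = "Photosynthesis"
  · subst ht
    by_cases hm1 : modality = "visual"
    · subst hm1
      by_cases hd1 : difficulty = "easy"
      · subst hd1; decide
      · by_cases hd2 : difficulty = "medium"
        · subst hd2; decide
        · simp [generate_content, generate_content_alt, INDEX_eq, SC_eq, scanA,
                PySem.Dict.contains_mk, PySem.Dict.get?_mk_cons, beq_iff_eq, Prod.mk.injEq, Ne.symm hd1, Ne.symm hd2]
    · by_cases hm2 : modality = "auditory"
      · subst hm2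
        by_cases hd1 : difficulty = "easy"
        · subst hd1; decide
        · by_cases hd2 : difficulty = "medium"
          · subst hd2; decide
          · simp [generate_content, generate_content_alt, INDEX_eq, SC_eq, scanA,
                  PySem.Dict.contains_mk, PySem.Dict.get?_mk_cons, beq_iff_eq, Prod.mk.injEq, Ne.symm hd1, Ne.symm hd2]
      · by_cases hm3 : modality = "text"
        · subst hm3
          by_cases hd1 : difficulty = "easy"
          · subst hd1; decide
          · by_cases hd2 : difficulty = "medium"
            · subst hd2; decide
            · simp [generate_content, generate_content_alt, INDEX_eq, SC_eq, scanA,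
                    PySem.Dict.contains_mk, PySem.Dict.get?_mk_cons, beq_iff_eq, Prod.mk.injEq, Ne.symm hd1, Ne.symm hd2]
        · simp [generate_content, generate_content_alt, INDEX_eq, SC_eq, scanA,
                PySem.Dict.contains_mk, PySem.Dict.get?_mk_cons, beq_iff_eq, Prod.mk.injEq, Ne.symm hm1, Ne.symm hm2, Ne.symm hm3]
          simp [PySem.Dict.get?]
  · simp [generate_content, generate_content_alt, INDEX_eq, SC_eq, scanA,
          PySem.Dict.contains_mk, PySem.Dict.get?_mk_cons, beq_iff_eq, Prod.mk.injEq, Ne.symm ht]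
    simp [PySem.Dict.get?]
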